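-- pv_equiv track=rewrite | github.com/seinkane1/phase-3-code-challenge-1 | challenge3.py | solution
-- ===== SOURCE A (Python) =====
-- def solution(N):
--     alphabet = 'abcdefghijklmnopqrstuvwxyz'
--     result = ''
--
--
--     full_repetitions = N // 26
--     remainder = N % 26
--
--     for i in range(26):
--         if i < remainder:
--             result += alphabet[i] * (full_repetitions + 1)
--         else:
--             result += alphabet[i] * full_repetitions
--
--     return result[:N]
-- ===== SOURCE B (Python) =====
-- def solution(N):
--     alphabet = 'abcdefghijklmnopqrstuvwxyz'
--     s = ''.join(alphabet[i % 26] for i in range(N))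
--     return ''.join(sorted(s))
-- ===== Notes on version B (the rewrite author's own statement) =====
-- stated objective: simpler
-- what changed: B builds the round-robin string directly (one alphabet letter per index, cycling) and sorts it into alphabetical blocks, instead of computing per-letter repetition counts with floor-division and modulo, concatenating one block per letter and truncating.
import Mathlib
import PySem

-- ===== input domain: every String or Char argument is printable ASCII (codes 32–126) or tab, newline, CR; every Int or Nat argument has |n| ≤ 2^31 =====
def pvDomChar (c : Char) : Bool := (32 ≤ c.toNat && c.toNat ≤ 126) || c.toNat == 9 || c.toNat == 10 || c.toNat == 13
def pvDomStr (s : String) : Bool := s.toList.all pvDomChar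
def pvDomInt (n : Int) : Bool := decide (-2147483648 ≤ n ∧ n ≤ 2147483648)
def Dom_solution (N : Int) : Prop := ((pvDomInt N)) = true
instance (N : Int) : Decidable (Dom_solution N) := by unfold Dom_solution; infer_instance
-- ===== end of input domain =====

-- B builds the round-robin list alphabet[i % 26] for i in range(N) and sorts it into the
-- alphabetical blocks, instead of computing per-letter counts with // and % and truncating.

-- ===== PORT A =====
def solution (N : Int) : String :=
  let alphabet : List Char := "abcdefghijklmnopqrstuvwxyz".toList
  let full_repetitions : Int := PySem.Int.floordiv N 26
  let remainder : Int := PySem.Int.mod N 26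
  let result : List Char :=
    (PySem.List.pyRange 0 26 1).foldl (fun acc i =>
      if i < remainder then
        acc ++ PySem.List.pyRepeat [PySem.List.pyGetD alphabet i ' '] (full_repetitions + 1)
      else
        acc ++ PySem.List.pyRepeat [PySem.List.pyGetD alphabet i ' '] full_repetitions) []
  String.ofList (PySem.List.slice result none (some N))

-- ===== PORT B =====
def solution_alt (N : Int) : String :=
  let alphabet : List Char := "abcdefghijklmnopqrstuvwxyz".toList
  let s : List Char :=
    (PySem.List.pyRange 0 N 1).map (fun i => PySem.List.pyGetD alphabet (PySem.Int.mod i 26) ' ')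
  String.ofList (PySem.List.sorted s (fun c => c) false)

-- ===== PRECONDITION & SPEC =====
def Spec_solution (N : Int) (out : String) : Prop := out = solution_alt N
instance (N : Int) (out : String) : Decidable (Spec_solution N out) := by unfold Spec_solution; infer_instance

-- ===== CLAIM (what is proved, stated in full; the proofs are below) =====
def Claim_equal_solution : Prop := ∀ (N : Int), Dom_solution N → Spec_solution N (solution N)

-- ===== LEMMAS AND PROOFS =====

theorem pvFd (a : Int) : PySem.Int.floordiv a 26 = a / 26 := by
  rw [PySem.Int.floordiv, Int.fdiv_eq_ediv]; simp

theorem pvFm (a : Int) : PySem.Int.mod a 26 = a % 26 := by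
  rw [PySem.Int.mod, Int.fmod_eq_emod]; simp

-- the list of letters, and the char at position i
def pvAlph : List Char := "abcdefghijklmnopqrstuvwxyz".toList

def pvCh (i : Int) : Char := PySem.List.pyGetD pvAlph i ' '

-- per-letter count for total length n
def pvK (n i : Nat) : Nat := n / 26 + (if i < n % 26 then 1 else 0)

-- the block concatenation for a count function k
def pvBlocks (k : Nat → Nat) : List Char :=
  ((List.range 26).map (fun i => List.replicate (k i) (pvCh i))).flatten

-- the round-robin list of length n
def pvRR (n : Nat) : List Char := (List.range n).map (fun (j : Nat) => pvCh (((j : Nat) : Int) % 26))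

theorem pvCh_mono : ∀ i < 26, ∀ j < 26, i ≤ j → pvCh (i : Nat) ≤ pvCh (j : Nat) := by decide

-- incrementing the count of one letter is a cons, up to permutation
theorem pvBlocks_bump (k k' : Nat → Nat) (j : Nat)
    (hj : j < 26) (hk : ∀ i < 26, k' i = k i + (if i = j then 1 else 0)) :
    (pvBlocks k').Perm (pvCh j :: pvBlocks k) := by
  have main : ∀ (is : List Nat), (∀ i ∈ is, i < 26) → is.Nodup → j ∈ is →
      ((is.map (fun i => List.replicate (k' i) (pvCh i))).flatten).Perm
        (pvCh j :: (is.map (fun i => List.replicate (k i) (pvCh i))).flatten) := by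
    intro is
    induction is with
    | nil => intro _ _ h; cases h
    | cons a t ih =>
      intro hlt hnd hmem
      simp only [List.map_cons, List.flatten_cons]
      rcases List.mem_cons.mp hmem with rfl | hmt
      · have : k' j = k j + 1 := by simpa using hk j (hlt j (List.mem_cons_self))
        rw [this]
        have hke : ∀ i ∈ t, k' i = k i := by
          intro i hi
          have hne : i ≠ j := fun h => (List.nodup_cons.mp hnd).1 (h ▸ hi)
          simpa [hne] using hk i (hlt i (List.mem_cons_of_mem _ hi))
        have : t.map (fun i => List.replicate (k' i) (pvCh i))
             = t.map (fun i => List.replicate (k i) (pvCh i)) :=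
          List.map_congr_left (fun i hi => by rw [hke i hi])
        rw [this, List.replicate_succ]
        simp
      · have hne : k' a = k a := by
          have : a ≠ j := fun h => (List.nodup_cons.mp hnd).1 (h ▸ hmt)
          simpa [this] using hk a (hlt a (List.mem_cons_self))
        rw [hne]
        have hperm := ih (fun i hi => hlt i (List.mem_cons_of_mem _ hi))
          (List.nodup_cons.mp hnd).2 hmt
        exact (hperm.append_left (List.replicate (k a) (pvCh (a : Nat)))).trans List.perm_middle
  exact main (List.range 26) (by simp) (List.nodup_range) (by simpa using hj)

theorem pvK_bump (n : Nat) : ∀ i < 26, pvK (n + 1) i = pvK n i + (if i = n % 26 then 1 else 0) := by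
  intro i hi
  unfold pvK
  split_ifs <;> omega

theorem pvRR_perm_blocks (n : Nat) : (pvRR n).Perm (pvBlocks (pvK n)) := by
  induction n with
  | zero =>
    have : pvBlocks (pvK 0) = [] := by decide
    simp [pvRR, this]
  | succ m ih =>
    have hstep : pvRR (m + 1) = pvRR m ++ [pvCh ((m : Int) % 26)] := by
      simp [pvRR, List.range_succ]
    have hmod : ((m : Int) % 26) = ((m % 26 : Nat) : Int) := by
      omega
    have hb := pvBlocks_bump (pvK m) (pvK (m + 1)) (m % 26)
      (Nat.mod_lt _ (by norm_num)) (pvK_bump m)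
    rw [hstep, hmod]
    exact ((List.perm_append_singleton _ _).trans (ih.cons _)).trans hb.symm

theorem pvBlocks_pairwise (k : Nat → Nat) : (pvBlocks k).Pairwise (· ≤ ·) := by
  unfold pvBlocks
  rw [List.pairwise_flatten]
  refine ⟨?_, ?_⟩
  · intro l hl
    simp only [List.mem_map] at hl
    obtain ⟨i, _, rfl⟩ := hl
    exact List.pairwise_replicate.mpr (Or.inr le_rfl)
  · rw [List.pairwise_map]
    refine List.pairwise_iff_getElem.mpr ?_
    intro p q hp hq hpq x hx y hy
    simp only [List.getElem_range] at hx hy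
    have hx' := List.eq_of_mem_replicate hx
    have hy' := List.eq_of_mem_replicate hy
    subst hx' hy'
    have hp26 : p < 26 := by simpa using hp
    have hq26 : q < 26 := by simpa using hq
    exact pvCh_mono p hp26 q hq26 (Nat.le_of_lt hpq)

-- the sorted round-robin list IS the block list
theorem pvSorted_eq (n : Nat) :
    PySem.List.sorted (pvRR n) (fun c => c) false = pvBlocks (pvK n) := by
  apply PySem.List.eq_of_perm_of_pairwise_le_of_injective (key := fun c : Char => c)
    (fun a b h => h)
  · exact (PySem.List.sorted_perm _ _ _).trans (pvRR_perm_blocks n)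
  · exact PySem.List.sorted_pairwise _ _
  · exact pvBlocks_pairwise _

-- A's loop body, rewritten as the block list, for N ≥ 0
theorem pvA_result_nonneg (n : Nat) :
    ((PySem.List.pyRange 0 26 1).foldl (fun acc i =>
      if i < PySem.Int.mod (n : Int) 26 then
        acc ++ PySem.List.pyRepeat [PySem.List.pyGetD pvAlph i ' '] (PySem.Int.floordiv (n : Int) 26 + 1)
      else
        acc ++ PySem.List.pyRepeat [PySem.List.pyGetD pvAlph i ' '] (PySem.Int.floordiv (n : Int) 26)) [])
    = pvBlocks (pvK n) := by
  rw [show (fun (acc : List Char) (i : Int) =>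
      if i < PySem.Int.mod (n : Int) 26 then
        acc ++ PySem.List.pyRepeat [PySem.List.pyGetD pvAlph i ' '] (PySem.Int.floordiv (n : Int) 26 + 1)
      else
        acc ++ PySem.List.pyRepeat [PySem.List.pyGetD pvAlph i ' '] (PySem.Int.floordiv (n : Int) 26))
    = fun acc i => acc ++ (if i < PySem.Int.mod (n : Int) 26 then
        PySem.List.pyRepeat [PySem.List.pyGetD pvAlph i ' '] (PySem.Int.floordiv (n : Int) 26 + 1)
      else
        PySem.List.pyRepeat [PySem.List.pyGetD pvAlph i ' '] (PySem.Int.floordiv (n : Int) 26))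
    from funext fun acc => funext fun i => by split_ifs <;> rfl]
  rw [PySem.List.foldl_append_eq_flatMap]
  rw [PySem.List.pyRange_one]
  simp only [List.flatMap_def, List.map_map, List.nil_append, sub_zero]
  unfold pvBlocks
  congr 1
  apply List.map_congr_left
  intro i hi
  have hi26 : i < 26 := by
    have := List.mem_range.mp hi
    omega
  have hfd : PySem.Int.floordiv (n : Int) 26 = ((n / 26 : Nat) : Int) := by
    rw [pvFd]; omega
  have hmd : PySem.Int.mod (n : Int) 26 = ((n % 26 : Nat) : Int) := by
    rw [pvFm]; omega
  simp only [Function.comp, zero_add, PySem.List.pyRepeat_singleton, hfd, hmd]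
  unfold pvK pvCh
  by_cases h : i < n % 26
  · rw [if_pos (show ((i : Nat) : Int) < ((n % 26 : Nat) : Int) by exact_mod_cast h), if_pos h]
    congr 1
  · rw [if_neg (show ¬ ((i : Nat) : Int) < ((n % 26 : Nat) : Int) by exact_mod_cast h), if_neg h]
    congr 1

theorem pvBlocks_length (n : Nat) : (pvBlocks (pvK n)).length = n := by
  have := (pvRR_perm_blocks n).length_eq
  simpa [pvRR] using this.symm

theorem pvA_neg (N : Int) (hN : N < 0) :
    ((PySem.List.pyRange 0 26 1).foldl (fun acc i =>
      if i < PySem.Int.mod N 26 then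
        acc ++ PySem.List.pyRepeat [PySem.List.pyGetD pvAlph i ' '] (PySem.Int.floordiv N 26 + 1)
      else
        acc ++ PySem.List.pyRepeat [PySem.List.pyGetD pvAlph i ' '] (PySem.Int.floordiv N 26)) [])
    = [] := by
  have hfd : PySem.Int.floordiv N 26 + 1 ≤ 0 := by
    rw [pvFd]; omega
  have h1 : ∀ (c : Char), PySem.List.pyRepeat [c] (PySem.Int.floordiv N 26 + 1) = [] := by
    intro c
    rw [PySem.List.pyRepeat_singleton, pvFd]
    have e : (N / 26 + 1).toNat = 0 := by omega
    rw [e, List.replicate_zero]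
  have h2 : ∀ (c : Char), PySem.List.pyRepeat [c] (PySem.Int.floordiv N 26) = [] := by
    intro c
    rw [PySem.List.pyRepeat_singleton, pvFd]
    have e : (N / 26).toNat = 0 := by omega
    rw [e, List.replicate_zero]
  have : ∀ (l : List Int) (acc : List Char), acc = [] →
      (l.foldl (fun acc i =>
        if i < PySem.Int.mod N 26 then
          acc ++ PySem.List.pyRepeat [PySem.List.pyGetD pvAlph i ' '] (PySem.Int.floordiv N 26 + 1)
        else
          acc ++ PySem.List.pyRepeat [PySem.List.pyGetD pvAlph i ' '] (PySem.Int.floordiv N 26)) acc) = [] := by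
    intro l
    induction l with
    | nil => intro acc h; simpa using h
    | cons a t ih =>
      intro acc h
      subst h
      apply ih
      show (if a < PySem.Int.mod N 26 then
          [] ++ PySem.List.pyRepeat [PySem.List.pyGetD pvAlph a ' '] (PySem.Int.floordiv N 26 + 1)
        else
          [] ++ PySem.List.pyRepeat [PySem.List.pyGetD pvAlph a ' '] (PySem.Int.floordiv N 26)) = []
      by_cases h : a < PySem.Int.mod N 26
      · rw [if_pos h, List.nil_append, h1]
      · rw [if_neg h, List.nil_append, h2]
  exact this _ [] rfl

-- ===== VERDICT (by name: the statement is the Claim_ definition above) =====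
theorem solution_spec : Claim_equal_solution := by
  intro N _
  unfold Spec_solution solution solution_alt
  show String.ofList _ = String.ofList _
  congr 1
  rcases Int.lt_or_le N 0 with hN | hN
  · rw [show "abcdefghijklmnopqrstuvwxyz".toList = pvAlph from rfl]
    rw [pvA_neg N hN]
    rw [PySem.List.pyRange_one_eq_nil (by omega)]
    simp [PySem.List.slice, PySem.List.sorted]
  · obtain ⟨n, rfl⟩ := Int.eq_ofNat_of_zero_le hN
    rw [show "abcdefghijklmnopqrstuvwxyz".toList = pvAlph from rfl]
    rw [pvA_result_nonneg n]
    have hrr : (PySem.List.pyRange 0 (n : Int) 1).map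
        (fun i => PySem.List.pyGetD pvAlph (PySem.Int.mod i 26) ' ') = pvRR n := by
      rw [PySem.List.pyRange_one]
      simp only [List.map_map, sub_zero, Int.toNat_natCast]
      unfold pvRR
      apply List.map_congr_left
      intro j _
      simp only [Function.comp, zero_add]
      rw [pvCh, pvFm]
    rw [hrr, pvSorted_eq n]
    rw [PySem.List.slice_to _ hN]
    rw [Int.toNat_natCast]
    have hlen : (pvBlocks (pvK n)).length ≤ n := by rw [pvBlocks_length]
    exact List.take_of_length_le hlen
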